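-- pv_equiv track=rewrite | github.com/Sindhuadulla/50-days-Code-challenge | mediumarr1.py | rearranging_numbers
-- ===== SOURCE A (Python) =====
-- def rearranging_numbers(arr):
--     N = len(arr)
--     res = [-1] * N
--     arr_set = set(arr)  # Convert list to set for O(1) lookup
--     for i in range(N):
--         if i in arr_set:
--             res[i] = i
--     return res
-- ===== SOURCE B (Python) =====
-- def rearranging_numbers(arr):
--     N = len(arr)
--     res = [-1] * N
--     for v in arr:
--         if 0 <= v < N:
--             res[v] = v
--     return res
-- ===== Notes on version B (the rewrite author's own statement) =====
-- stated objective: simpler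
-- what changed: Replaces A's gather pass (build a set of arr, then scan every index i in range(N) and test membership) with a direct scatter pass over the elements: for each in-range value v, write res[v] = v; no auxiliary set is built.
import Mathlib
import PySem

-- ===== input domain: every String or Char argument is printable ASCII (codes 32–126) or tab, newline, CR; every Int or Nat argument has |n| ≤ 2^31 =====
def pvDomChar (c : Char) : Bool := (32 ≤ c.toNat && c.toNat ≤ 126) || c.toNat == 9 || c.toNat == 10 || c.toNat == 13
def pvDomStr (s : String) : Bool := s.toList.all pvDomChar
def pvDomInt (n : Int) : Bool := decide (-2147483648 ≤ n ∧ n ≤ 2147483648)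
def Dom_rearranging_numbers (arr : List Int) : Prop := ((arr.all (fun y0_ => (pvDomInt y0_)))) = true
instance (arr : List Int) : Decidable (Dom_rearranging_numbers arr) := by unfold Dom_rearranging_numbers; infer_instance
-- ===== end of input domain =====

-- B replaces A's gather pass (build a set, scan all indices, test membership) by a direct
-- scatter pass over the elements (simpler: no auxiliary set, one loop over arr).

-- ===== PORT A =====
def rearranging_numbers (arr : List Int) : List Int :=
  let N := arr.length
  let res := List.replicate N (-1 : Int)
  let arrSet : PySem.Set Int := PySem.Set.ofList arr
  (PySem.List.pyRange 0 (N : Int) 1).foldl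
    (fun r i => if PySem.Set.contains arrSet i then PySem.List.pySetD r i i else r) res

-- ===== PORT B =====
def rearranging_numbers_alt (arr : List Int) : List Int :=
  let N := (arr.length : Int)
  arr.foldl (fun r v => if 0 ≤ v ∧ v < N then PySem.List.pySetD r v v else r)
    (List.replicate arr.length (-1 : Int))

-- ===== PRECONDITION & SPEC =====
def Spec_rearranging_numbers (arr : List Int) (out : List Int) : Prop := out = rearranging_numbers_alt arr
instance (arr : List Int) (out : List Int) : Decidable (Spec_rearranging_numbers arr out) := by unfold Spec_rearranging_numbers; infer_instance

-- ===== CLAIM (what is proved, stated in full; the proofs are below) =====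
def Claim_equal_rearranging_numbers : Prop := ∀ (arr : List Int), Dom_rearranging_numbers arr → Spec_rearranging_numbers arr (rearranging_numbers arr)

-- ===== LEMMAS AND PROOFS =====

lemma set_getElem? (l : List Int) (i j : Nat) (a : Int) :
    (l.set i a)[j]? = if i = j ∧ j < l.length then some a else l[j]? := by
  rw [List.getElem?_set]
  by_cases h : i = j
  · subst h
    by_cases hl : i < l.length <;> simp [hl]
  · simp [h]

-- B's scatter loop, characterised pointwise.
lemma scatter_get (N : Int) (rest : List Int) (res : List Int) (j : Nat) :
    (rest.foldl (fun r v => if 0 ≤ v ∧ v < N then PySem.List.pySetD r v v else r) res)[j]? =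
      if (j : Int) ∈ rest ∧ (j : Int) < N ∧ j < res.length then some (j : Int) else res[j]? := by
  induction rest generalizing res with
  | nil => simp
  | cons v rest ih =>
    simp only [List.foldl_cons, List.mem_cons]
    by_cases hg : 0 ≤ v ∧ v < N
    · rw [if_pos hg, PySem.List.pySetD_of_nonneg _ _ hg.1, ih, List.length_set, set_getElem?]
      have hvt : v.toNat = j ↔ (j : Int) = v := by omega
      by_cases hmem : (j : Int) ∈ rest <;> by_cases hjv : (j : Int) = v <;>
        split_ifs <;> simp_all
    · rw [if_neg hg, ih]
      have hjv : (j : Int) = v → ¬ ((j : Int) < N) := fun h hlt => hg ⟨by omega, by omega⟩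
      by_cases hjv' : (j : Int) = v <;> split_ifs <;> simp_all
      omega

-- A's loop body preserves the length of the result list.
lemma gather_length (arr : List Int) (l : List Int) (res : List Int) :
    (l.foldl (fun r i => if PySem.Set.contains (PySem.Set.ofList arr) i then PySem.List.pySetD r i i else r) res).length
      = res.length := by
  induction l generalizing res with
  | nil => rfl
  | cons i l ih =>
    simp only [List.foldl_cons, ih]
    split_ifs <;> simp [PySem.List.length_pySetD]

-- A's gather loop over range(n), characterised pointwise.
lemma gather_get (arr : List Int) (n : Nat) (res : List Int) (j : Nat) :
    ((PySem.List.pyRange 0 (n : Int) 1).foldl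
        (fun r i => if PySem.Set.contains (PySem.Set.ofList arr) i then PySem.List.pySetD r i i else r) res)[j]? =
      if j < n ∧ (j : Int) ∈ arr ∧ j < res.length then some (j : Int) else res[j]? := by
  induction n with
  | zero => simp [PySem.List.pyRange_one_eq_nil]
  | succ n ih =>
    have hcast : ((n + 1 : Nat) : Int) = (n : Int) + 1 := by push_cast; ring
    rw [hcast, PySem.List.pyRange_one_succ_right (by positivity), List.foldl_append]
    simp only [List.foldl_cons, List.foldl_nil]
    have hc : PySem.Set.contains (PySem.Set.ofList arr) (n : Int) = true ↔ (n : Int) ∈ arr := by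
      simp [pysem]
    have hlen := gather_length arr (PySem.List.pyRange 0 (n : Int) 1) res
    by_cases hmem : (n : Int) ∈ arr
    · rw [if_pos (hc.mpr hmem), PySem.List.pySetD_natCast, set_getElem?, hlen, ih]
      by_cases hjn : j = n
      · subst hjn
        by_cases hl : j < res.length
        · simp [hl, hmem]
        · simp [hl]
      · rw [if_neg (fun h => hjn h.1.symm)]
        have h2 : (j < n) ↔ (j < n + 1) := by omega
        simp only [h2]
    · rw [if_neg (by simp [pysem, hmem]), ih]
      by_cases hjn : j = n
      · subst hjn; simp [hmem]
      · have h2 : (j < n) ↔ (j < n + 1) := by omega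
        simp only [h2]

-- ===== VERDICT (by name: the statement is the Claim_ definition above) =====
theorem rearranging_numbers_spec : Claim_equal_rearranging_numbers := by
  intro arr _
  unfold Spec_rearranging_numbers rearranging_numbers rearranging_numbers_alt
  apply List.ext_getElem?
  intro j
  rw [gather_get, scatter_get]
  simp only [List.length_replicate]
  have h : (j < arr.length ∧ (j : Int) ∈ arr ∧ j < arr.length)
      ↔ ((j : Int) ∈ arr ∧ (j : Int) < (arr.length : Int) ∧ j < arr.length) := by
    constructor
    · rintro ⟨h1, h2, h3⟩; exact ⟨h2, by exact_mod_cast h1, h3⟩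
    · rintro ⟨h1, h2, h3⟩; exact ⟨h3, h1, h3⟩
  simp only [h]
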